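-- pv_equiv track=rewrite | github.com/Nilsiloid/Zense-MiniCTF | Rev/Flag Extraction??/solve.py | manipulate_string
-- ===== SOURCE A (Python) =====
-- def manipulate_string(input_str):
--     result = []
--     for i, char in enumerate(input_str):
--         if i % 2 == 0:  # Even index
--             result.append(chr(ord(char) - 1))
--         else:  # Odd index
--             result.append(chr(ord(char) + 1))
--     return ''.join(result)
-- ===== SOURCE B (Python) =====
-- def manipulate_string(input_str):
--     evens = [chr(ord(c) - 1) for c in input_str[::2]]
--     odds = [chr(ord(c) + 1) for c in input_str[1::2]]
--     out = []
--     for e, o in zip(evens, odds):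
--         out.append(e)
--         out.append(o)
--     if len(odds) < len(evens):
--         out.append(evens[-1])
--     return ''.join(out)
-- ===== Notes on version B (the rewrite author's own statement) =====
-- stated objective: alternative
-- what changed: Replaces the single enumerate loop with its parity branch by two strided slice passes (input_str[::2] shifted down, input_str[1::2] shifted up) interleaved back together, with the leftover even character appended for odd lengths.
import Mathlib
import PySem

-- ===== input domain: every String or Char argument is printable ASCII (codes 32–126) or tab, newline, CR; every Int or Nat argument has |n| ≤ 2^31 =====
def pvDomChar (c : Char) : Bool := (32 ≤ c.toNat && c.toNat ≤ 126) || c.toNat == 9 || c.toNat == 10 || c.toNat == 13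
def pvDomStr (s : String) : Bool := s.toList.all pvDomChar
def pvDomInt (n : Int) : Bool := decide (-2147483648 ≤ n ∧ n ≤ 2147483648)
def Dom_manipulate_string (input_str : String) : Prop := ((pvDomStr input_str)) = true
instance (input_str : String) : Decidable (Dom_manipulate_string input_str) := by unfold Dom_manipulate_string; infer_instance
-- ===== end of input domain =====

-- B re-decomposes A's parity-branched loop as two strided slice passes plus an interleave (objective: alternative; same cost).

-- ===== PORT A =====
def manipulate_string (input_str : String) : String :=
  -- for i, char in enumerate(input_str): if i % 2 == 0: append chr(ord-1) else append chr(ord+1)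
  String.ofList ((PySem.List.enumerate input_str.toList 0).foldl
    (fun result p =>
      if PySem.Int.mod p.1 2 == 0 then
        result ++ [Char.ofNat (p.2.toNat - 1)]
      else
        result ++ [Char.ofNat (p.2.toNat + 1)]) [])

-- ===== PORT B =====
-- xs[::2] ported by hand (PySem.List.slice? covers it but is opaque here): every second element from the head; exact for step 2.
def pvStride2 {α : Type} : List α → List α
  | [] => []
  | [c] => [c]
  | c :: _ :: r => c :: pvStride2 r

def manipulate_string_alt (input_str : String) : String :=
  let evens := (pvStride2 input_str.toList).map (fun c => Char.ofNat (c.toNat - 1))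
  let odds  := (pvStride2 input_str.toList.tail).map (fun c => Char.ofNat (c.toNat + 1))
  let out := (evens.zip odds).foldl (fun acc p => acc ++ [p.1, p.2]) []
  -- evens[-1]: the guard len(odds) < len(evens) makes the index valid, so the default is never used
  let out := if odds.length < evens.length then out ++ [PySem.List.pyGetD evens (-1) ' '] else out
  String.ofList out

-- ===== PRECONDITION & SPEC =====
def Spec_manipulate_string (input_str : String) (out : String) : Prop := out = manipulate_string_alt input_str
instance (input_str : String) (out : String) : Decidable (Spec_manipulate_string input_str out) := by unfold Spec_manipulate_string; infer_instance

-- ===== CLAIM (what is proved, stated in full; the proofs are below) =====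
def Claim_equal_manipulate_string : Prop := ∀ (input_str : String), Dom_manipulate_string input_str → Spec_manipulate_string input_str (manipulate_string input_str)

-- ===== LEMMAS AND PROOFS =====

-- the common value of both programs on a character list, pairwise
def pvCore : List Char → List Char
  | [] => []
  | [c] => [Char.ofNat (c.toNat - 1)]
  | c1 :: c2 :: r => Char.ofNat (c1.toNat - 1) :: Char.ofNat (c2.toNat + 1) :: pvCore r

theorem pv_foldA (l : List (Int × Char)) (acc : List Char) :
    l.foldl (fun result p =>
      if PySem.Int.mod p.1 2 == 0 then result ++ [Char.ofNat (p.2.toNat - 1)]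
      else result ++ [Char.ofNat (p.2.toNat + 1)]) acc
    = acc ++ l.map (fun p => if PySem.Int.mod p.1 2 == 0 then Char.ofNat (p.2.toNat - 1)
        else Char.ofNat (p.2.toNat + 1)) := by
  have : (fun (result : List Char) (p : Int × Char) =>
      if PySem.Int.mod p.1 2 == 0 then result ++ [Char.ofNat (p.2.toNat - 1)]
      else result ++ [Char.ofNat (p.2.toNat + 1)])
      = (fun result p => result ++ [if PySem.Int.mod p.1 2 == 0 then Char.ofNat (p.2.toNat - 1)
        else Char.ofNat (p.2.toNat + 1)]) := by
    funext result p
    by_cases h : (PySem.Int.mod p.1 2 == 0) = true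
    · rw [if_pos h, if_pos h]
    · rw [if_neg h, if_neg h]
  rw [this, PySem.List.foldl_append_singleton_eq_map]

theorem pv_A_eq_core (cs : List Char) (s : Int) (hs : PySem.Int.mod s 2 = 0) :
    (PySem.List.enumerate cs s).map (fun p => if PySem.Int.mod p.1 2 == 0 then Char.ofNat (p.2.toNat - 1)
        else Char.ofNat (p.2.toNat + 1)) = pvCore cs := by
  induction cs using pvCore.induct generalizing s with
  | case1 => simp [PySem.List.enumerate_nil, pvCore]
  | case2 c =>
    have hb0 : (PySem.Int.mod s 2 == 0) = true := by rw [hs]; rfl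
    rw [PySem.List.enumerate_cons, PySem.List.enumerate_nil]
    simp only [List.map_cons, List.map_nil]
    rw [if_pos hb0]
    rfl
  | case3 c1 c2 r ih =>
    have h2 : (0:Int) < 2 := by omega
    have hs' : s % 2 = 0 := by rwa [PySem.Int.mod_eq_emod_of_pos h2] at hs
    have h1 : PySem.Int.mod (s + 1) 2 = 1 := by
      rw [PySem.Int.mod_eq_emod_of_pos h2]; omega
    have hnext : PySem.Int.mod (s + 1 + 1) 2 = 0 := by
      rw [PySem.Int.mod_eq_emod_of_pos h2]; omega
    have hb0 : (PySem.Int.mod s 2 == 0) = true := by rw [hs]; rfl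
    have hb1 : ¬ ((PySem.Int.mod (s + 1) 2 == 0) = true) := by rw [h1]; simp
    rw [PySem.List.enumerate_cons, PySem.List.enumerate_cons]
    simp only [List.map_cons]
    rw [if_pos hb0, if_neg hb1, ih _ hnext]
    rfl

theorem pv_stride2_tail (c : Char) (r : List Char) :
    pvStride2 (c :: r) = c :: pvStride2 r.tail := by
  cases r <;> rfl

theorem pv_pyGetD_last (x : Char) (l : List Char) (d : Char) (h : l ≠ []) :
    PySem.List.pyGetD (x::l) (-1) d = PySem.List.pyGetD l (-1) d := by
  have hl : 1 ≤ l.length := by cases l <;> simp_all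
  have h2 : l.length - 1 < l.length := by omega
  simp [PySem.List.pyGetD, PySem.List.pyGet?, PySem.List.pyIdx?, hl, List.getElem_cons,
    List.getElem?_eq_getElem h2, h]

theorem pv_B_eq_core (cs : List Char) :
    (let evens := (pvStride2 cs).map (fun c => Char.ofNat (c.toNat - 1))
     let odds  := (pvStride2 cs.tail).map (fun c => Char.ofNat (c.toNat + 1))
     let out := (evens.zip odds).foldl (fun acc p => acc ++ [p.1, p.2]) []
     if odds.length < evens.length then out ++ [PySem.List.pyGetD evens (-1) ' '] else out)
    = pvCore cs := by
  induction cs using pvCore.induct with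
  | case1 => simp [pvStride2, pvCore]
  | case2 c =>
    simp [pvStride2, pvCore, PySem.List.pyGetD, PySem.List.pyGet?, PySem.List.pyIdx?]
  | case3 c1 c2 r ih =>
    simp only [pvStride2, pv_stride2_tail, List.tail_cons, List.map_cons, List.zip_cons_cons,
      PySem.List.foldl_append_eq_flatMap, List.flatMap_cons, List.nil_append, List.length_cons,
      Nat.add_lt_add_iff_right] at ih ⊢
    by_cases hlen : ((pvStride2 r.tail).map (fun c => Char.ofNat (c.toNat + 1))).length
        < ((pvStride2 r).map (fun c => Char.ofNat (c.toNat - 1))).length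
    · have hne : ((pvStride2 r).map (fun c => Char.ofNat (c.toNat - 1))) ≠ [] := by
        intro h0; rw [h0] at hlen; simp at hlen
      rw [if_pos hlen, pv_pyGetD_last _ _ _ hne]
      rw [if_pos hlen] at ih
      simp [pvCore, ← ih]
    · rw [if_neg hlen]
      rw [if_neg hlen] at ih
      simp [pvCore, ← ih]

-- ===== VERDICT (by name: the statement is the Claim_ definition above) =====
theorem manipulate_string_spec : Claim_equal_manipulate_string := by
  intro s _hd
  unfold Spec_manipulate_string manipulate_string manipulate_string_alt
  rw [pv_foldA, List.nil_append, pv_A_eq_core s.toList 0 (by decide), ← pv_B_eq_core s.toList]
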